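-- pv_equiv track=rewrite | github.com/Bruception/advent-of-code-2021 | day18/part1.py | can_explode
-- ===== SOURCE A (Python) =====
-- def can_explode(num):
--     depth = 0
--     for i, token in enumerate(num):
--         if (token == '['):
--             depth += 1
--         elif (token == ']'):
--             depth -= 1
--             if (depth >= 4):
--                 return i
--     return -1
-- ===== SOURCE B (Python) =====
-- def can_explode(num):
--     # Phase 1: full running-depth table (prefix sums of +1/-1 bracket deltas).
--     depths = []
--     d = 0
--     for t in num:
--         d += (t == '[') - (t == ']')
--         depths.append(d)
--     # Phase 2: first closing bracket whose post-decrement depth is >= 4.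
--     return next((i for i, t in enumerate(num) if t == ']' and depths[i] >= 4), -1)
-- ===== Notes on version B (the rewrite author's own statement) =====
-- stated objective: alternative
-- what changed: B first builds the whole running-depth table by prefix sums over the tokens, then a separate filtering pass returns the first closing-bracket index whose table depth reaches the threshold, instead of A's single interleaved counting-and-return loop.
import Mathlib
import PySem

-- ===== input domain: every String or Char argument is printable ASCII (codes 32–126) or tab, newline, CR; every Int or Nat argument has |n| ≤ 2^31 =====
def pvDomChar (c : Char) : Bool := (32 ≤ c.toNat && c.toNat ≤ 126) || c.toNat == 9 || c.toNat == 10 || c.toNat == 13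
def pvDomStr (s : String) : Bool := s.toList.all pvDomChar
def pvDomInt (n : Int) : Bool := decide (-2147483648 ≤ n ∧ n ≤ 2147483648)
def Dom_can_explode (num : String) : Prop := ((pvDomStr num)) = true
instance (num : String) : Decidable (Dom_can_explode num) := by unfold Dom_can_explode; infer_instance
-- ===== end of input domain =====

-- B builds the full running-depth table first, then filters; same values as A (alternative decomposition, same cost).

-- ===== PORT A =====
-- A's single loop: maintain depth, return the index at a ']' that leaves depth >= 4.
def canExplodeLoopA : List Char → Int → Int → Int
  | [], _, _ => -1
  | c :: rest, i, depth =>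
    if c = '[' then canExplodeLoopA rest (i + 1) (depth + 1)
    else if c = ']' then
      if depth - 1 ≥ 4 then i else canExplodeLoopA rest (i + 1) (depth - 1)
    else canExplodeLoopA rest (i + 1) depth

def can_explode (num : String) : Int := canExplodeLoopA num.toList 0 0

-- ===== PORT B =====
-- Phase 1 of B: running-depth table (prefix sums of the bracket deltas).
def depthTable : List Char → Int → List Int
  | [], _ => []
  | c :: rest, d =>
    let d' := d + ((if c = '[' then 1 else 0) - (if c = ']' then 1 else 0))
    d' :: depthTable rest d'

-- Phase 2 of B: first index i with num[i] = ']' and depths[i] >= 4, else -1.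
def findExplode : List Char → List Int → Int → Int
  | c :: cs, d :: ds, i =>
    if c = ']' ∧ d ≥ 4 then i else findExplode cs ds (i + 1)
  | _, _, _ => -1

def can_explode_alt (num : String) : Int :=
  findExplode num.toList (depthTable num.toList 0) 0

-- ===== PRECONDITION & SPEC =====
def Spec_can_explode (num : String) (out : Int) : Prop := out = can_explode_alt num
instance (num : String) (out : Int) : Decidable (Spec_can_explode num out) := by unfold Spec_can_explode; infer_instance

-- ===== CLAIM (what is proved, stated in full; the proofs are below) =====
def Claim_equal_can_explode : Prop := ∀ (num : String), Dom_can_explode num → Spec_can_explode num (can_explode num)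

-- ===== LEMMAS AND PROOFS =====
theorem loopA_eq_table (cs : List Char) : ∀ (i d : Int),
    canExplodeLoopA cs i d = findExplode cs (depthTable cs d) i := by
  induction cs with
  | nil => intro i d; rfl
  | cons c rest ih =>
    intro i d
    by_cases h1 : c = '['
    · subst h1
      simpa [canExplodeLoopA, depthTable, findExplode] using ih (i + 1) (d + 1)
    · by_cases h2 : c = ']'
      · subst h2
        simp [canExplodeLoopA, depthTable, findExplode, h1]
        rw [ih (i + 1) (d - 1)]
        have harith : d + (-1 : Int) = d - 1 := by ring
        rw [harith]
        split_ifs <;> first | rfl | omega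
      · simpa [canExplodeLoopA, depthTable, findExplode, h1, h2]
          using ih (i + 1) d

-- ===== VERDICT (by name: the statement is the Claim_ definition above) =====
theorem can_explode_spec : Claim_equal_can_explode := by
  intro num _
  unfold Spec_can_explode can_explode can_explode_alt
  exact loopA_eq_table _ 0 0
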